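-- pv_equiv track=rewrite | github.com/egowalk/processing-pipelines | egowalk_pipelines/models/segments_extraction.py | _filter_tags
-- ===== SOURCE A (Python) =====
-- def _filter_tags(
--                  tags: list[str],
--                  blacklist: list[str]) -> list[str]:
--     result = []
--     for tag in tags:
--         to_add = True
--         for blacklist_tag in blacklist:
--             if blacklist_tag in tag:
--                 to_add = False
--                 break
--         if to_add:
--             result.append(tag)
--     return result
-- ===== SOURCE B (Python) =====
-- def _filter_tags(tags, blacklist):
--     survivors = tags
--     for b in blacklist:
--         survivors = [t for t in survivors if b not in t]
--     return survivors
-- ===== Notes on version B (the rewrite author's own statement) =====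
-- stated objective: alternative
-- what changed: A loops tag-major with a to_add flag and an inner break over the blacklist; B loops blacklist-major, repeatedly filtering the survivor list by one blacklist word at a time, with no flag or break.
import Mathlib
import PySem

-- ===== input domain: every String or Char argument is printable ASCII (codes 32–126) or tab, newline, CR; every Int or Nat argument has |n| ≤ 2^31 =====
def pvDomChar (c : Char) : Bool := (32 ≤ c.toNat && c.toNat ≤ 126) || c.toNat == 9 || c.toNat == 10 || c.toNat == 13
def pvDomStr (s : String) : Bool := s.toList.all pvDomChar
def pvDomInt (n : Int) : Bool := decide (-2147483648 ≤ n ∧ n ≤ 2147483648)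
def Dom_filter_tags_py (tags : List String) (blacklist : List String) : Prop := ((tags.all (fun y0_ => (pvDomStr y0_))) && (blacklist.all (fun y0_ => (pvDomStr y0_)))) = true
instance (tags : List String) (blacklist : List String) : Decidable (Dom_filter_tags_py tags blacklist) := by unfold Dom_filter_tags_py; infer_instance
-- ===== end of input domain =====

-- ===== PORT A =====
-- B differs only in the return value's construction; no argument is mutated.
-- inner loop of A: 'for blacklist_tag in blacklist: if blacklist_tag in tag: to_add=False; break'
def pvAInner (tag : String) : List String → Bool
  | [] => true
  | b :: rest => if PySem.Str.isIn b tag then false else pvAInner tag rest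

def filter_tags_py (tags : List String) (blacklist : List String) : List String :=
  tags.foldl (fun result tag =>
    if pvAInner tag blacklist then result ++ [tag] else result) []

-- ===== PORT B =====
-- B: blacklist-major — successively filter the survivor list by each blacklist word
def filter_tags_py_alt (tags : List String) (blacklist : List String) : List String :=
  blacklist.foldl (fun survivors b =>
    survivors.filter (fun t => !(PySem.Str.isIn b t))) tags

-- ===== PRECONDITION & SPEC =====
def Spec_filter_tags_py (tags : List String) (blacklist : List String) (out : List String) : Prop := out = filter_tags_py_alt tags blacklist
instance (tags : List String) (blacklist : List String) (out : List String) : Decidable (Spec_filter_tags_py tags blacklist out) := by unfold Spec_filter_tags_py; infer_instance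

-- ===== CLAIM (what is proved, stated in full; the proofs are below) =====
def Claim_equal_filter_tags_py : Prop := ∀ (tags : List String) (blacklist : List String), Dom_filter_tags_py tags blacklist → Spec_filter_tags_py tags blacklist (filter_tags_py tags blacklist)

-- ===== LEMMAS AND PROOFS =====

lemma pvAlt_eq_filter (blacklist : List String) : ∀ (tags : List String),
    blacklist.foldl (fun survivors b => survivors.filter (fun t => !(PySem.Str.isIn b t))) tags
      = tags.filter (fun t => pvAInner t blacklist) := by
  induction blacklist with
  | nil => intro tags; simp [pvAInner]
  | cons b rest ih =>
      intro tags
      rw [List.foldl_cons, ih, List.filter_filter]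
      congr 1
      funext t
      rw [pvAInner]
      by_cases h : PySem.Str.isIn b t = true <;>
        simp [PySem.Str.isIn] at h <;> simp [h, Bool.and_comm]

-- ===== VERDICT (by name: the statement is the Claim_ definition above) =====
theorem filter_tags_py_spec : Claim_equal_filter_tags_py := by
  intro tags blacklist _
  unfold Spec_filter_tags_py filter_tags_py filter_tags_py_alt
  rw [pvAlt_eq_filter]
  simpa using PySem.List.foldl_append_if_eq_filter (fun t => pvAInner t blacklist) tags []
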